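-- pv_equiv track=rewrite | github.com/akekesi/CoMa | ZT_02.py | is_Int_Palindrom
-- ===== SOURCE A (Python) =====
-- def is_Intlist_Palindrom(C):
--     s = 0
--     for i in range(int(len(C)/2)+1):
--         if C[i] == C[-i-1]:
--             s += 1
--     if s == int(len(C)/2)+1:
--         return True
--     else:
--         return False
--
-- def is_Int_Palindrom(c):
--     if c < 0:
--         return None
--     else:
--         s = str(c)
--         C = []
--         for i in s:
--             C.append(int(i))
--         return is_Intlist_Palindrom(C)
-- ===== SOURCE B (Python) =====
-- def is_Int_Palindrom(c):
--     if c < 0: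
--         return None
--     rev = 0
--     n = c
--     while n > 0:
--         rev = rev * 10 + n % 10
--         n //= 10
--     return rev == c
-- ===== Notes on version B (the rewrite author's own statement) =====
-- stated objective: idiomatic
-- what changed: Replaces A's string conversion, digit-list construction and symmetric-index counting loop with a purely arithmetic digit reversal (rev = rev*10 + n%10) compared against the original number.
import Mathlib
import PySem

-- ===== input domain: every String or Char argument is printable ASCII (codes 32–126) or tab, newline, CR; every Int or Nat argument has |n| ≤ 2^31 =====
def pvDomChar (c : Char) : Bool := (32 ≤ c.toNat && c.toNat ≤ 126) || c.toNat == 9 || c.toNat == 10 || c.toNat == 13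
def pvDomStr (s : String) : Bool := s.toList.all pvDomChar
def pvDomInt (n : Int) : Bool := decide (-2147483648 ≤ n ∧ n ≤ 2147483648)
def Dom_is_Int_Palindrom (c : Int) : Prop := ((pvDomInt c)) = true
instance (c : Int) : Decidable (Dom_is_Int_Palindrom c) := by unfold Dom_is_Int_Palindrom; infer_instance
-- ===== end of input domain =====

-- B replaces A's string conversion, digit-list construction and symmetric-index counting loop
-- with a purely arithmetic digit reversal compared against the original number (objective: idiomatic).

-- ===== PORT A =====
-- int(len(C)/2): true division of a nonnegative int by 2 then int() truncation = truncdiv.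
-- C[i] / C[-i-1]: inside is_Int_Palindrom the indices are always in range (len C ≥ 1 and
-- i ≤ len//2), so the total form pyGetD is exact there.
def is_Intlist_Palindrom (C : List Int) : Bool :=
  let s : Int :=
    (PySem.List.pyRange 0 (PySem.Int.truncdiv (PySem.List.len C) 2 + 1) 1).foldl
      (fun s i => if PySem.List.pyGetD C i 0 = PySem.List.pyGetD C (-i - 1) 0 then s + 1 else s) 0
  if s = PySem.Int.truncdiv (PySem.List.len C) 2 + 1 then true else false

-- int(i) on a single character of str(c): c ≥ 0 so every character is a digit and
-- int(i) never raises; ofChars? is some there, so .getD 0 is exact.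
def is_Int_Palindrom (c : Int) : Option Bool :=
  if c < 0 then none
  else
    let s := PySem.Int.toChars c
    let C := s.foldl (fun C ch => C ++ [(PySem.Int.ofChars? [ch]).getD 0]) ([] : List Int)
    some (is_Intlist_Palindrom C)

-- ===== PORT B =====
-- while n > 0: rev = rev*10 + n%10; n //= 10
def pvRevLoop (n rev : Int) : Int :=
  if _h : 0 < n then
    pvRevLoop (PySem.Int.floordiv n 10) (rev * 10 + PySem.Int.mod n 10)
  else rev
termination_by n.toNat
decreasing_by
  have h1 : PySem.Int.floordiv n 10 < n := by
    simp only [PySem.Int.floordiv, Int.fdiv_eq_ediv]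
    omega
  have _h2 : 0 ≤ PySem.Int.floordiv n 10 := by
    simp only [PySem.Int.floordiv, Int.fdiv_eq_ediv]
    omega
  omega

def is_Int_Palindrom_alt (c : Int) : Option Bool :=
  if c < 0 then none
  else some (pvRevLoop c 0 == c)

-- ===== PRECONDITION & SPEC =====
def Spec_is_Int_Palindrom (c : Int) (out : Option Bool) : Prop := out = is_Int_Palindrom_alt c
instance (c : Int) (out : Option Bool) : Decidable (Spec_is_Int_Palindrom c out) := by unfold Spec_is_Int_Palindrom; infer_instance

-- ===== CLAIM (what is proved, stated in full; the proofs are below) =====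
def Claim_equal_is_Int_Palindrom : Prop := ∀ (c : Int), Dom_is_Int_Palindrom c → Spec_is_Int_Palindrom c (is_Int_Palindrom c)

-- ===== LEMMAS AND PROOFS =====

-- A's list-building loop is a map
theorem pv_foldl_snoc_map (l : List Char) (f : Char → Int) :
    ∀ acc : List Int, l.foldl (fun C ch => C ++ [f ch]) acc = acc ++ l.map f := by
  induction l with
  | nil => simp
  | cons ch l ih => intro acc; simp [List.foldl_cons, ih]

-- Nat.toDigits computes the base-10 digits, most significant first
theorem pv_toDigitsCore_eq (f : ℕ) :
    ∀ (n : ℕ) (ds : List Char), 0 < n → n < f →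
      Nat.toDigitsCore 10 f n ds = ((Nat.digits 10 n).map Nat.digitChar).reverse ++ ds := by
  induction f with
  | zero => intro n ds hn hf; omega
  | succ f ih =>
    intro n ds hn hf
    rw [Nat.toDigitsCore]
    rw [Nat.digits_def' (by norm_num : 1 < 10) hn]
    by_cases h : n / 10 = 0
    · simp [h]
    · have hlt : n / 10 < f := by
        have := Nat.div_lt_self hn (by norm_num : 1 < 10)
        omega
      rw [if_neg h, ih (n / 10) _ (Nat.pos_of_ne_zero h) hlt]
      simp

theorem pv_toChars_pos (n : ℕ) (hn : 0 < n) :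
    PySem.Int.toChars (n : Int) = ((Nat.digits 10 n).map Nat.digitChar).reverse := by
  have h0 : ¬ ((n : Int) < 0) := by omega
  simp only [PySem.Int.toChars, if_neg h0, Int.toNat_natCast, Nat.toDigits]
  rw [pv_toDigitsCore_eq (n + 1) n [] hn (by omega)]
  simp

theorem pv_digit_val (d : ℕ) (hd : d < 10) :
    (PySem.Int.ofChars? [Nat.digitChar d]).getD 0 = (d : Int) := by
  interval_cases d <;> decide

-- the list A builds from str(c), for positive c
theorem pv_A_digit_list (n : ℕ) (hn : 0 < n) :
    (PySem.Int.toChars (n : Int)).foldl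
        (fun C ch => C ++ [(PySem.Int.ofChars? [ch]).getD 0]) ([] : List Int)
      = ((Nat.digits 10 n).map (Nat.cast : ℕ → ℤ)).reverse := by
  rw [pv_foldl_snoc_map, pv_toChars_pos n hn, List.nil_append, List.map_reverse]
  congr 1
  rw [List.map_map]
  exact List.map_congr_left (fun d hdm => pv_digit_val d (Nat.digits_lt_base (by norm_num) hdm))

-- A's counting loop as a countP, and its saturation condition
theorem pv_foldl_count (q : ℕ → Prop) [DecidablePred q] (l : List ℕ) :
    ∀ s : Int, l.foldl (fun s k => if q k then s + 1 else s) s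
      = s + (l.countP (fun k => decide (q k)) : ℕ) := by
  induction l with
  | nil => simp
  | cons k l ih =>
    intro s
    simp only [List.foldl_cons, List.countP_cons, ih]
    by_cases h : q k
    · simp [h]; ring
    · simp [h]

theorem pv_foldl_count_iff (q : ℕ → Prop) [DecidablePred q] (t : ℕ) :
    ((List.range t).foldl (fun s k => if q k then s + 1 else s) (0 : Int) = (t : Int))
      ↔ ∀ k, k < t → q k := by
  rw [pv_foldl_count]
  have hle : (List.range t).countP (fun k => decide (q k)) ≤ t := by
    simpa using List.countP_le_length (l := List.range t) (p := fun k => decide (q k))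
  constructor
  · intro h k hk
    have hc : (List.range t).countP (fun k => decide (q k)) = t := by omega
    have hall := List.countP_eq_length.mp (by rw [hc]; simp)
    simpa using hall k (List.mem_range.mpr hk)
  · intro h
    have : (List.range t).countP (fun k => decide (q k)) = (List.range t).length :=
      List.countP_eq_length.mpr (fun a ha => by simpa using h a (List.mem_range.mp ha))
    simp [this]

-- agreement on the half range ↔ palindrome
theorem pv_palin_iff (C : List Int) (hC : C ≠ []) :
    (∀ k, k ≤ C.length / 2 → C.getD k 0 = C.getD (C.length - 1 - k) 0) ↔ C = C.reverse := by
  have hlen : 0 < C.length := List.length_pos_iff.mpr hC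
  constructor
  · intro h
    have key : ∀ j, j < C.length → C.getD j 0 = C.getD (C.length - 1 - j) 0 := by
      intro j hj
      by_cases hj2 : j ≤ C.length / 2
      · exact h j hj2
      · have h' := h (C.length - 1 - j) (by omega)
        have e : C.length - 1 - (C.length - 1 - j) = j := by omega
        rw [e] at h'
        exact h'.symm
    apply List.ext_getElem?
    intro i
    by_cases hi : i < C.length
    · rw [List.getElem?_reverse hi, List.getElem?_eq_getElem hi,
          List.getElem?_eq_getElem (show C.length - 1 - i < C.length by omega)]
      have hki := key i hi
      rw [List.getD_eq_getElem _ _ hi, List.getD_eq_getElem _ _ (by omega)] at hki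
      exact congrArg some hki
    · rw [List.getElem?_eq_none (by omega), List.getElem?_eq_none (by simp; omega)]
  · intro h k hk
    have hlt : k < C.length := by omega
    have e1 : C[k]? = C[C.length - 1 - k]? := by
      conv_lhs => rw [h]
      exact List.getElem?_reverse hlt
    rw [List.getD_eq_getElem?_getD, List.getD_eq_getElem?_getD, e1]

-- A's Boolean result characterised as a list palindrome test
theorem pv_A_iff (C : List Int) (hC : C ≠ []) :
    is_Intlist_Palindrom C = true ↔ C = C.reverse := by
  unfold is_Intlist_Palindrom
  have hlen : 0 < C.length := List.length_pos_iff.mpr hC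
  have htd : PySem.Int.truncdiv (PySem.List.len C) 2 = ((C.length / 2 : ℕ) : Int) := by
    simp only [PySem.List.len, PySem.Int.truncdiv, Int.tdiv_eq_ediv]
    push_cast
    omega
  rw [htd]
  set m := C.length / 2 with hm
  have hrange : PySem.List.pyRange 0 ((m : Int) + 1) 1
      = (List.range (m + 1)).map (Nat.cast : ℕ → ℤ) := by
    rw [PySem.List.pyRange_one]
    have e : (((m : Int) + 1) - 0).toNat = m + 1 := by omega
    rw [e]
    exact List.map_congr_left (fun k _ => by omega)
  rw [hrange, List.foldl_map]
  have hiff := pv_foldl_count_iff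
      (fun k : ℕ => PySem.List.pyGetD C (k : Int) 0 = PySem.List.pyGetD C (-(k : Int) - 1) 0)
      (m + 1)
  have hcast : ((m + 1 : ℕ) : Int) = (m : Int) + 1 := by push_cast; ring
  rw [hcast] at hiff
  have hq : ∀ k, k < m + 1 →
      ((PySem.List.pyGetD C (k : Int) 0 = PySem.List.pyGetD C (-(k : Int) - 1) 0)
        ↔ (C.getD k 0 = C.getD (C.length - 1 - k) 0)) := by
    intro k hk
    have hkL : k < C.length := by omega
    have h1 : PySem.List.pyGetD C (k : Int) 0 = C.getD k 0 := PySem.List.pyGetD_natCast C k 0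
    have h2 : PySem.List.pyGetD C (-(k : Int) - 1) 0 = C[C.length - (k + 1)] := by
      have e : (-(k : Int) - 1) = -((k + 1 : ℕ) : Int) := by push_cast; ring
      rw [e, PySem.List.pyGetD_neg_natCast C (k + 1) 0 (by omega) (by omega)]
    have h3 : C.getD (C.length - 1 - k) 0 = C[C.length - (k + 1)] := by
      rw [List.getD_eq_getElem C 0 (show C.length - 1 - k < C.length by omega)]
      congr 1
      omega
    rw [h1, h2, h3]
  have hbool : ∀ (X : Prop) [Decidable X], ((if X then true else false) = true ↔ X) := by
    intro X _
    split <;> simp_all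
  rw [hbool]
  refine Iff.trans hiff ?_
  rw [← pv_palin_iff C hC]
  constructor
  · intro h k hk
    exact (hq k (by omega)).mp (h k (by omega))
  · intro h k hk
    exact (hq k hk).mpr (h k (by omega))

-- B's loop computes the reversed-digit number
theorem pv_revLoop_eq (m : ℕ) : ∀ r : Int,
    pvRevLoop (m : Int) r
      = r * 10 ^ (Nat.digits 10 m).length + (Nat.ofDigits 10 (Nat.digits 10 m).reverse : ℕ) := by
  induction m using Nat.strong_induction_on with
  | _ m ih =>
    intro r
    rw [pvRevLoop]
    by_cases hm : 0 < (m : Int)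
    · rw [dif_pos hm]
      have hm' : 0 < m := by omega
      have hdiv : PySem.Int.floordiv (m : Int) 10 = ((m / 10 : ℕ) : Int) := by
        simp only [PySem.Int.floordiv, Int.fdiv_eq_ediv]
        have e : ((m / 10 : ℕ) : Int) = (m : Int) / 10 := by push_cast; rfl
        rw [e]
        omega
      have hmod : PySem.Int.mod (m : Int) 10 = ((m % 10 : ℕ) : Int) := by
        simp only [PySem.Int.mod, Int.fmod_eq_emod]
        have e : ((m % 10 : ℕ) : Int) = (m : Int) % 10 := by push_cast; rfl
        rw [e]
        omega
      rw [hdiv, hmod, ih (m / 10) (Nat.div_lt_self hm' (by norm_num)) _]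
      rw [Nat.digits_def' (by norm_num : 1 < 10) hm']
      simp only [List.reverse_cons, Nat.ofDigits_append, List.length_cons, List.length_reverse]
      push_cast [Nat.ofDigits_singleton]
      ring
    · have h0 : m = 0 := by omega
      subst h0
      simp

-- the crux: the reversed-digit number equals n iff the digit list is a palindrome
theorem pv_rev_eq_iff (n : ℕ) (hn : 0 < n) :
    (Nat.ofDigits 10 (Nat.digits 10 n).reverse = n)
      ↔ (Nat.digits 10 n) = (Nat.digits 10 n).reverse := by
  set d := Nat.digits 10 n with hd
  constructor
  · intro h
    rcases hdc : d with _ | ⟨d0, t⟩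
    · rfl
    · rw [hdc] at h
      by_cases h0 : d0 = 0
      · exfalso
        subst h0
        have hlt : Nat.ofDigits 10 ((0 :: t).reverse) < 10 ^ t.length := by
          rw [List.reverse_cons, Nat.ofDigits_append]
          simp only [Nat.ofDigits_cons, Nat.ofDigits_nil]
          have hb : Nat.ofDigits 10 t.reverse < 10 ^ t.reverse.length := by
            apply Nat.ofDigits_lt_base_pow_length (by norm_num)
            intro x hx
            have hx' : x ∈ (10 : ℕ).digits n := by rw [← hd, hdc]; simp at hx ⊢; tauto
            exact Nat.digits_lt_base (by norm_num) hx'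
          simpa using hb
        have hge : 10 ^ t.length ≤ n := by
          have hb := Nat.base_pow_length_digits_le 10 n (by norm_num) (by omega)
          rw [← hd, hdc] at hb
          simp only [List.length_cons] at hb
          have h10 : (10 : ℕ) ^ (t.length + 1) = 10 * 10 ^ t.length := by ring
          omega
        omega
      · have hcanon : Nat.digits 10 (Nat.ofDigits 10 (d0 :: t).reverse) = (d0 :: t).reverse := by
          apply Nat.digits_ofDigits 10 (by norm_num)
          · intro x hx
            have hx' : x ∈ (10 : ℕ).digits n := by
              rw [← hd, hdc]; exact (List.mem_reverse).mp hx
            exact Nat.digits_lt_base (by norm_num) hx'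
          · intro _
            rw [List.getLast_reverse]
            exact h0
        rw [h, ← hd, hdc] at hcanon
        exact hcanon
  · intro h
    conv_lhs => rw [← h]
    rw [hd, Nat.ofDigits_digits]

-- ===== VERDICT (by name: the statement is the Claim_ definition above) =====
theorem is_Int_Palindrom_spec : Claim_equal_is_Int_Palindrom := by
  intro c _
  unfold Spec_is_Int_Palindrom is_Int_Palindrom is_Int_Palindrom_alt
  by_cases hneg : c < 0
  · simp [hneg]
  · rw [if_neg hneg, if_neg hneg]
    have hn : c = ((c.toNat : ℕ) : Int) := by omega
    set n := c.toNat with hdefn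
    by_cases hn0 : n = 0
    · rw [hn, hn0]
      simp only [Nat.cast_zero]
      have hB : pvRevLoop 0 0 = (0 : ℤ) := by rw [pvRevLoop]; norm_num
      rw [hB]
      decide
    · have hpos : 0 < n := Nat.pos_of_ne_zero hn0
      rw [hn]
      show some (is_Intlist_Palindrom ((PySem.Int.toChars (n : Int)).foldl
            (fun C ch => C ++ [(PySem.Int.ofChars? [ch]).getD 0]) ([] : List Int)))
          = some (pvRevLoop (n : Int) 0 == (n : Int))
      rw [pv_A_digit_list n hpos]
      congr 1
      have hdne : Nat.digits 10 n ≠ [] := Nat.digits_ne_nil_iff_ne_zero.mpr hn0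
      have hCne : ((Nat.digits 10 n).map (Nat.cast : ℕ → ℤ)).reverse ≠ [] := by simp [hdne]
      have hinj : Function.Injective (Nat.cast : ℕ → ℤ) := fun a b hab => by
        simpa using hab
      rw [Bool.eq_iff_iff, pv_A_iff _ hCne, beq_iff_eq, pv_revLoop_eq n 0]
      rw [zero_mul, zero_add, Nat.cast_inj, pv_rev_eq_iff n hpos]
      set d := Nat.digits 10 n
      rw [List.reverse_reverse]
      constructor
      · intro h
        rw [← List.map_reverse] at h
        exact ((List.map_injective_iff.mpr hinj) h).symm
      · intro h
        rw [← List.map_reverse]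
        exact (congrArg (List.map (Nat.cast : ℕ → ℤ)) h).symm
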